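-- pv_equiv track=rewrite | github.com/whdgusdl48/Programmers_Algorithm | Level3/solution_2021_04_01.py | solution
-- ===== SOURCE A (Python) =====
-- def solution(n, s):
--     answer = []
--     if n > s:
--         return [-1]
--     else:
--         s_n = s // n
--         for i in range(n):
--             answer.append(s_n)
--         sp = s % n
--
--         idx = -1
--         for i in range(sp):
--             answer[idx-i] += 1
--
--     return answer
-- ===== SOURCE B (Python) =====
-- def solution(n, s):
--     if n > s:
--         return [-1]
--     answer = []
--     remaining = s
--     for i in range(n):
--         part = remaining // (n - i)
--         answer.append(part)
--         remaining -= part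
--     return answer
-- ===== Notes on version B (the rewrite author's own statement) =====
-- stated objective: alternative
-- what changed: Replaces A's fill-with-quotient-then-patch-the-tail-by-negative-index two-pass scheme with a one-pass greedy loop that at each step emits remaining // parts_left and subtracts it from a running remainder (no precomputed base/remainder, no in-place patching).
import Mathlib
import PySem

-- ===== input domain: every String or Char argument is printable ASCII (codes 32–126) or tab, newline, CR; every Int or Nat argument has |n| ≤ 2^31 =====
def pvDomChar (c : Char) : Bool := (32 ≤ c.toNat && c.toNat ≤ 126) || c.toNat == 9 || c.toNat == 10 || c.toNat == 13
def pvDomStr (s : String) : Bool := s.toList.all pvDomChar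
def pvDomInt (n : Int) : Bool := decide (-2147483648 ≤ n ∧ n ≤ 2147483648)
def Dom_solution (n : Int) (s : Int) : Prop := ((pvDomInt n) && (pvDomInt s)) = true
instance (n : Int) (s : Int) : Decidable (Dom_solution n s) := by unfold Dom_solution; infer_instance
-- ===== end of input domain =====

-- B replaces A's fill-then-patch-the-tail scheme with a one-pass greedy loop (part = remaining // parts_left); alternative algorithm, same O(n) cost.


-- ===== PORT A =====
def solution (n : Int) (s : Int) : List Int :=
  if n > s then [-1]
  else
    let s_n := PySem.Int.floordiv s n
    let answer := (PySem.List.pyRange 0 n).foldl (fun acc _ => acc ++ [s_n]) ([] : List Int)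
    let sp := PySem.Int.mod s n
    let idx : Int := -1
    (PySem.List.pyRange 0 sp).foldl
      (fun acc i => PySem.List.pySetD acc (idx - i) (PySem.List.pyGetD acc (idx - i) 0 + 1)) answer

-- ===== PORT B =====
def solution_alt (n : Int) (s : Int) : List Int :=
  if n > s then [-1]
  else
    ((PySem.List.pyRange 0 n).foldl
      (fun (st : List Int × Int) i =>
        let part := PySem.Int.floordiv st.2 (n - i)
        (st.1 ++ [part], st.2 - part))
      (([] : List Int), s)).1

-- ===== PRECONDITION & SPEC =====
-- Pre_ excludes exactly n = 0 with 0 ≤ s, where Python A raises ZeroDivisionError at s // n.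
def Pre_solution (n : Int) (s : Int) : Prop := ¬ (n = 0 ∧ 0 ≤ s)
instance (n : Int) (s : Int) : Decidable (Pre_solution n s) := by unfold Pre_solution; infer_instance
def pvWitness_solution : Int × Int := (5, 11)

def Spec_solution (n : Int) (s : Int) (out : List Int) : Prop := out = solution_alt n s
instance (n : Int) (s : Int) (out : List Int) : Decidable (Spec_solution n s out) := by unfold Spec_solution; infer_instance

-- ===== CLAIM (what is proved, stated in full; the proofs are below) =====
def Claim_equal_solution : Prop := ∀ (n : Int) (s : Int), Dom_solution n s → Pre_solution n s → Spec_solution n s (solution n s)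

-- ===== LEMMAS AND PROOFS =====

-- A side: appending a constant in a loop is replicate
lemma fill_foldl {v : Int} (l : List Int) (acc : List Int) :
    l.foldl (fun acc _ => acc ++ [v]) acc = acc ++ List.replicate l.length v := by
  induction l generalizing acc with
  | nil => simp
  | cons x xs ih => simp [List.foldl_cons, ih, List.replicate_succ]

-- pySetD at a negative in-range index writes at length - j
lemma pySetD_neg {α : Type} (xs : List α) (j : Nat) (v : α)
    (h1 : 0 < j) (h2 : j ≤ xs.length) :
    PySem.List.pySetD xs (-(j : Int)) v = xs.set (xs.length - j) v := by
  have h1' : -((xs.length : Int)) ≤ -(j : Int) := by omega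
  have hj0 : j ≠ 0 := by omega
  simp [PySem.List.pySetD, PySem.List.pySet?, PySem.List.pyIdx?, h1', hj0]

lemma replicate_set_last (j : Nat) (b v : Int) :
    (List.replicate (j + 1) b).set j v = List.replicate j b ++ [v] := by
  induction j with
  | zero => rfl
  | succ k ih =>
      have h := ih
      simp only [List.replicate_succ] at h ⊢
      simp only [List.set_cons_succ, h, List.cons_append]

-- A's second loop turns the tail of a constant list into +1 entries
lemma patch_foldl (base : Int) (N : Nat) :
    ∀ k : Nat, k ≤ N →
    (PySem.List.pyRange 0 (k : Int)).foldl
      (fun acc i => PySem.List.pySetD acc (-1 - i) (PySem.List.pyGetD acc (-1 - i) 0 + 1))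
      (List.replicate N base)
    = List.replicate (N - k) base ++ List.replicate k (base + 1) := by
  intro k
  induction k with
  | zero => intro _; simp
  | succ k ih =>
      intro hk
      have hk' : k ≤ N := by omega
      have hrange : PySem.List.pyRange 0 ((k : Int) + 1)
          = PySem.List.pyRange 0 (k : Int) ++ [(k : Int)] :=
        PySem.List.pyRange_one_succ_right (by positivity)
      have hcast : ((k + 1 : Nat) : Int) = (k : Int) + 1 := by push_cast; ring
      rw [hcast, hrange, List.foldl_append, ih hk']
      simp only [List.foldl_cons, List.foldl_nil]
      have hneg : (-1 : Int) - (k : Int) = -((k + 1 : Nat) : Int) := by push_cast; ring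
      rw [hneg]
      have hget : PySem.List.pyGetD
          (List.replicate (N - k) base ++ List.replicate k (base + 1))
          (-((k + 1 : Nat) : Int)) 0 = base := by
        rw [PySem.List.pyGetD_neg_natCast _ (k + 1) 0 (by omega) (by simp; omega)]
        have hidx : (List.replicate (N - k) base ++ List.replicate k (base + 1)).length - (k + 1)
            < (List.replicate (N - k) base).length := by simp; omega
        rw [List.getElem_append_left hidx]
        simp
      rw [hget, pySetD_neg _ (k + 1) (base + 1) (by omega) (by simp; omega)]
      have hidx2 : (List.replicate (N - k) base ++ List.replicate k (base + 1)).length - (k + 1)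
          = N - (k + 1) := by simp; omega
      rw [hidx2]
      rw [List.set_append_left _ _ (by simp; omega)]
      have hsplit : N - k = (N - (k + 1)) + 1 := by omega
      rw [hsplit, replicate_set_last (N - (k + 1)) base (base + 1)]
      simp [List.replicate_succ, List.append_assoc]

lemma length_pyRange_zero (n : Int) : (PySem.List.pyRange 0 n).length = n.toNat := by
  simp [PySem.List.pyRange_one]

-- B side: the greedy loop as a structural recursion on the number of remaining parts
def greedy : Nat → Int → List Int
  | 0, _ => []
  | k + 1, r =>
      let p := PySem.Int.floordiv r ((k + 1 : Nat) : Int)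
      p :: greedy k (r - p)

-- B's fold over range(a, n) computes greedy on the count of remaining iterations
lemma greedy_fold (n : Int) : ∀ (k : Nat) (a r : Int) (acc : List Int), a + (k : Int) = n →
    ((PySem.List.pyRange a n).foldl
      (fun (st : List Int × Int) i =>
        let part := PySem.Int.floordiv st.2 (n - i)
        (st.1 ++ [part], st.2 - part))
      (acc, r)).1
    = acc ++ greedy k r := by
  intro k
  induction k with
  | zero =>
      intro a r acc ha
      have : PySem.List.pyRange a n = [] := PySem.List.pyRange_one_eq_nil (by omega)
      simp [this, greedy]
  | succ k ih =>
      intro a r acc ha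
      have hlt : a < n := by omega
      rw [PySem.List.pyRange_one_cons hlt, List.foldl_cons]
      have hdiv : n - a = ((k + 1 : Nat) : Int) := by omega
      simp only [hdiv]
      rw [ih (a + 1) _ _ (by push_cast; omega)]
      simp [greedy, List.append_assoc]

-- quotient/remainder characterisation for a positive divisor
lemma fdiv_mod_unique (r b q m : Int) (hb : 0 < b) (heq : r = q * b + m)
    (hm0 : 0 ≤ m) (hmb : m < b) :
    PySem.Int.floordiv r b = q ∧ PySem.Int.mod r b = m := by
  have hq : PySem.Int.floordiv r b = q := by
    rw [PySem.Int.floordiv_eq_iff_of_pos hb]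
    constructor
    · nlinarith
    · nlinarith
  refine ⟨hq, ?_⟩
  have := PySem.Int.floordiv_mul_add_mod r b
  rw [hq] at this
  omega

-- greedy computes the balanced split: base parts first, base+1 parts at the end
lemma greedy_eq (k : Nat) : ∀ r : Int, 0 ≤ r →
    greedy (k + 1) r
    = List.replicate ((k + 1) - (PySem.Int.mod r ((k + 1 : Nat) : Int)).toNat)
        (PySem.Int.floordiv r ((k + 1 : Nat) : Int))
      ++ List.replicate (PySem.Int.mod r ((k + 1 : Nat) : Int)).toNat
        (PySem.Int.floordiv r ((k + 1 : Nat) : Int) + 1) := by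
  induction k with
  | zero =>
      intro r _
      have hm0 : 0 ≤ PySem.Int.mod r 1 := PySem.Int.mod_nonneg r (by omega)
      have hm1 : PySem.Int.mod r 1 < 1 := PySem.Int.mod_lt r (by omega)
      have hm : PySem.Int.mod r ((1 : Nat) : Int) = 0 := by
        simp only [Nat.cast_one]; omega
      simp only [greedy, hm, Int.toNat_zero, List.replicate_zero, List.append_nil,
        Nat.sub_zero]
      rfl
  | succ k ih =>
      intro r hr
      have hbpos : (0 : Int) < ((k + 2 : Nat) : Int) := by push_cast; omega
      set b : Int := ((k + 2 : Nat) : Int) with hb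
      set q := PySem.Int.floordiv r b with hqdef
      set m := PySem.Int.mod r b with hmdef
      have heq : q * b + m = r := PySem.Int.floordiv_mul_add_mod r b
      have hm0 : 0 ≤ m := PySem.Int.mod_nonneg r hbpos
      have hmb : m < b := PySem.Int.mod_lt r hbpos
      have hq0 : 0 ≤ q := by
        rw [hqdef]
        rw [PySem.Int.le_floordiv_iff_mul_le hbpos]
        omega
      have hstep : greedy (k + 2) r = q :: greedy (k + 1) (r - q) := by
        have : ((k + 1 + 1 : Nat) : Int) = b := by rw [hb]
        simp only [greedy, this, ← hqdef]
      have hr' : r - q = q * ((k + 1 : Nat) : Int) + m := by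
        have : b = ((k + 1 : Nat) : Int) + 1 := by rw [hb]; push_cast; ring
        rw [this] at heq; linarith [heq]
      have hk1pos : (0 : Int) < ((k + 1 : Nat) : Int) := by push_cast; omega
      have hr'0 : 0 ≤ r - q := by
        rw [hr']
        have := mul_nonneg hq0 (le_of_lt hk1pos)
        omega
      by_cases hcase : m < ((k + 1 : Nat) : Int)
      · -- remainder unchanged
        obtain ⟨hdq, hdm⟩ := fdiv_mod_unique (r - q) ((k + 1 : Nat) : Int) q m hk1pos hr' hm0 hcase
        rw [hstep, ih (r - q) hr'0, hdq, hdm]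
        have hms : m.toNat ≤ k + 1 := by omega
        have hsplit : (k + 2) - m.toNat = ((k + 1) - m.toNat) + 1 := by omega
        rw [hsplit, List.replicate_succ, List.cons_append]
      · -- m = k + 1: the new head is the last base part
        have hmeq : m = ((k + 1 : Nat) : Int) := by
          have : m ≤ ((k + 1 : Nat) : Int) := by
            have : b = ((k + 1 : Nat) : Int) + 1 := by rw [hb]; push_cast; ring
            omega
          omega
        have hr'' : r - q = (q + 1) * ((k + 1 : Nat) : Int) + 0 := by
          rw [hr', hmeq]; ring
        obtain ⟨hdq, hdm⟩ := fdiv_mod_unique (r - q) ((k + 1 : Nat) : Int) (q + 1) 0 hk1pos hr'' le_rfl hk1pos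
        rw [hstep, ih (r - q) hr'0, hdq, hdm]
        have hmt : m.toNat = k + 1 := by omega
        simp [hmt]

-- ===== VERDICT (by name: the statement is the Claim_ definition above) =====
theorem solution_spec : Claim_equal_solution := by
  intro n s _ hpre
  unfold Spec_solution solution solution_alt
  by_cases hgt : n > s
  · simp [hgt]
  · simp only [hgt, if_false]
    set base := PySem.Int.floordiv s n with hbase
    set sp := PySem.Int.mod s n with hsp
    rcases lt_trichotomy n 0 with hneg | hzero | hpos
    · -- n < 0 : both sides are []
      have hb : n < sp ∧ sp ≤ 0 := PySem.Int.mod_neg_bounds s hneg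
      have h1 : PySem.List.pyRange 0 n = [] := PySem.List.pyRange_one_eq_nil (by omega)
      have h2 : PySem.List.pyRange 0 sp = [] := PySem.List.pyRange_one_eq_nil (by omega)
      rw [h1, h2]
      simp
    · exact absurd ⟨hzero, by omega⟩ hpre
    · -- n > 0, hence s ≥ n > 0
      have hns : n ≤ s := by omega
      have hs0 : 0 ≤ s := by omega
      have hsp0 : 0 ≤ sp := PySem.Int.mod_nonneg s hpos
      have hspn : sp < n := PySem.Int.mod_lt s hpos
      -- A's side
      rw [fill_foldl, length_pyRange_zero, List.nil_append]
      have hspc : sp = ((sp.toNat : Nat) : Int) := by omega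
      rw [hspc, patch_foldl base n.toNat sp.toNat (by omega)]
      -- B's side
      obtain ⟨k, hk⟩ : ∃ k : Nat, n.toNat = k + 1 := ⟨n.toNat - 1, by omega⟩
      have hcast : ((k + 1 : Nat) : Int) = n := by omega
      have hk1 : (k + 1) - sp.toNat = n.toNat - sp.toNat := by omega
      rw [greedy_fold n n.toNat 0 s [] (by omega), List.nil_append, hk,
          greedy_eq k s hs0, hcast, ← hbase, ← hsp, hk1]
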